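-- pv_equiv track=rewrite | github.com/greatertomi/problem-solving | codility-challenges/rectangle-strip.py | rectangleStrip
-- ===== SOURCE A (Python) =====
-- def rectangleStrip(arr1, arr2):
--     valueMap = {}
--     for i in range(len(arr1)):
--         if arr1[i] == arr2[i]:
--             if arr1[i] in valueMap:
--                 valueMap[arr1[i]] += 1
--             else:
--                 valueMap[arr1[i]] = 1
--         else:
--             if arr1[i] in valueMap:
--                 valueMap[arr1[i]] += 1
--             else:
--                 valueMap[arr1[i]] = 1
--
--             if arr2[i] in valueMap:
--                 valueMap[arr2[i]] += 1
--             else: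
--                 valueMap[arr2[i]] = 1
--     return max(valueMap.values())
-- ===== SOURCE B (Python) =====
-- def rectangleStrip(arr1, arr2):
--     # Dictionary-free: gather the keys each index contributes (arr1[i] always,
--     # arr2[i] additionally when different), then sort and scan for the longest
--     # run of equal values -- which is exactly the highest multiplicity.
--     items = [v for i in range(len(arr1))
--                for v in ([arr1[i]] if arr1[i] == arr2[i] else [arr1[i], arr2[i]])]
--     items.sort()
--     best = 0
--     run = 0
--     prev = None
--     for v in items:
--         run = run + 1 if prev == v else 1
--         if run > best:
--             best = run
--         prev = v
--     return best
-- ===== Notes on version B (the rewrite author's own statement) =====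
-- stated objective: alternative
-- what changed: A's hash-map tally (duplicated if/else increment branches, then max of the dict values) is replaced by a dictionary-free sort-then-scan: a comprehension gathers the contributed keys, the list is sorted, and one linear scan finds the longest run of equal values, which is the highest multiplicity.
import Mathlib
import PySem

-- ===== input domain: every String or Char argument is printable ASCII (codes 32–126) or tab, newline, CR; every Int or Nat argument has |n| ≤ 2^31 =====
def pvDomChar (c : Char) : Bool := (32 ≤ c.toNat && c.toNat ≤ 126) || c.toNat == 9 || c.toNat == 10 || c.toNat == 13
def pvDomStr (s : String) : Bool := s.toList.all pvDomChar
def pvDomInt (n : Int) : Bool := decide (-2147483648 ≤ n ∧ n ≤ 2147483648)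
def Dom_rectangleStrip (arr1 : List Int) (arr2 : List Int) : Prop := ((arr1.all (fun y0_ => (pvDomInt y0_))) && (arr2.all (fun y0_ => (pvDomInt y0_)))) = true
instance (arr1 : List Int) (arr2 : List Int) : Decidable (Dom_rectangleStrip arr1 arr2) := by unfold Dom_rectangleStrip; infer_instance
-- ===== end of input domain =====

-- B drops A's hash-map tally for a dictionary-free sort-then-scan: gather the contributed
-- keys, sort, and one scan finds the longest run of equal values; objective: alternative.

-- ===== PORT A =====
-- `if k in d: d[k] += 1 else: d[k] = 1`
def pvIncA (d : PySem.Dict Int Int) (k : Int) : PySem.Dict Int Int :=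
  if d.contains k then d.modify k 0 (· + 1) else d.insert k 1

def rectangleStrip (arr1 : List Int) (arr2 : List Int) : Int :=
  let valueMap := (PySem.List.pyRange 0 arr1.length 1).foldl (fun d i =>
    let a := (PySem.List.pyGet? arr1 i).getD 0   -- in range for i ∈ range(len(arr1))
    let b := (PySem.List.pyGet? arr2 i).getD 0   -- IndexError when arr2 is shorter: outside Pre_
    if a = b then pvIncA d a
    else pvIncA (pvIncA d a) b) PySem.Dict.empty
  (PySem.List.max? valueMap.values (fun y => y)).getD 0   -- ValueError on empty: outside Pre_

-- ===== PORT B =====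
-- the loop body: run = run + 1 if prev == v else 1; best updated; prev = v
def pvRunStep (st : Int × Int × Option Int) (v : Int) : Int × Int × Option Int :=
  let run := if st.2.2 = some v then st.2.1 + 1 else 1
  let best := if run > st.1 then run else st.1
  (best, run, some v)

def rectangleStrip_alt (arr1 : List Int) (arr2 : List Int) : Int :=
  let items := (PySem.List.pyRange 0 arr1.length 1).flatMap (fun i =>
    let a := (PySem.List.pyGet? arr1 i).getD 0
    let b := (PySem.List.pyGet? arr2 i).getD 0
    if a = b then [a] else [a, b])
  let s := PySem.List.sorted items (fun x => x) false
  (s.foldl pvRunStep (0, 0, none)).1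

-- ===== PRECONDITION & SPEC =====
-- Pre_ excludes exactly the inputs on which A raises: the empty arr1 (ValueError from
-- max of an empty dict) and arr2 shorter than arr1 (IndexError on arr2[i]).
def Pre_rectangleStrip (arr1 : List Int) (arr2 : List Int) : Prop :=
  arr1 ≠ [] ∧ arr1.length ≤ arr2.length
instance (arr1 : List Int) (arr2 : List Int) : Decidable (Pre_rectangleStrip arr1 arr2) := by
  unfold Pre_rectangleStrip; infer_instance

def pvWitness_rectangleStrip : List Int × List Int := ([1, 2, 2], [2, 2, 5])

def Spec_rectangleStrip (arr1 : List Int) (arr2 : List Int) (out : Int) : Prop := out = rectangleStrip_alt arr1 arr2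
instance (arr1 : List Int) (arr2 : List Int) (out : Int) : Decidable (Spec_rectangleStrip arr1 arr2 out) := by unfold Spec_rectangleStrip; infer_instance

-- ===== CLAIM (what is proved, stated in full; the proofs are below) =====
def Claim_equal_rectangleStrip : Prop := ∀ (arr1 : List Int) (arr2 : List Int), Dom_rectangleStrip arr1 arr2 → Pre_rectangleStrip arr1 arr2 → Spec_rectangleStrip arr1 arr2 (rectangleStrip arr1 arr2)

-- ===== LEMMAS AND PROOFS =====

-- the keys index i contributes
def pvChunk (arr1 arr2 : List Int) (i : Int) : List Int :=
  let a := (PySem.List.pyGet? arr1 i).getD 0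
  let b := (PySem.List.pyGet? arr2 i).getD 0
  if a = b then [a] else [a, b]

-- A's branchy increment is the Counter step
theorem pvIncA_eq (d : PySem.Dict Int Int) (k : Int) :
    pvIncA d k = d.modify k 0 (· + 1) := by
  unfold pvIncA PySem.Dict.modify
  split_ifs with h
  · rfl
  · rw [PySem.Dict.getD_of_not_contains d 0 (by simpa using h)]; norm_num

-- A's dict is the counter of the concatenated chunks
theorem valueMapA_eq (arr1 arr2 : List Int) :
    (PySem.List.pyRange 0 arr1.length 1).foldl (fun d i =>
      let a := (PySem.List.pyGet? arr1 i).getD 0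
      let b := (PySem.List.pyGet? arr2 i).getD 0
      if a = b then pvIncA d a
      else pvIncA (pvIncA d a) b) PySem.Dict.empty
    = PySem.Dict.counter ((PySem.List.pyRange 0 arr1.length 1).flatMap (pvChunk arr1 arr2)) := by
  rw [PySem.Dict.counter_eq_foldl, List.foldl_flatMap]
  refine List.foldl_ext _ _ _ (fun d i _ => ?_)
  simp only [pvChunk]
  by_cases h : (PySem.List.pyGet? arr1 i).getD 0 = (PySem.List.pyGet? arr2 i).getD 0 <;>
    simp [h, List.foldl, pvIncA_eq]

-- the counter's values are exactly the multiplicities of the list's members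
theorem values_counter_setEq (items : List Int) (w : Int) :
    w ∈ (PySem.Dict.counter items).values ↔ ∃ v ∈ items, w = (items.count v : Int) := by
  rw [PySem.Dict.values_eq_map_keys _ (PySem.Dict.nodup_keys_counter items) 0]
  simp only [PySem.Dict.keys_counter, List.mem_map]
  constructor
  · rintro ⟨k, hk, rfl⟩
    exact ⟨k, (PySem.Set.mem_ofList _ _).1 hk, by rw [PySem.Dict.getD_counter]⟩
  · rintro ⟨k, hk, rfl⟩
    exact ⟨k, (PySem.Set.mem_ofList _ _).2 hk, by rw [PySem.Dict.getD_counter]⟩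

-- the gathered key list is nonempty when arr1 is
theorem items_ne (arr1 arr2 : List Int) (h : arr1 ≠ []) :
    (PySem.List.pyRange 0 arr1.length 1).flatMap (pvChunk arr1 arr2) ≠ [] := by
  have hl : (0 : Int) < arr1.length := by
    have := List.length_pos_iff.2 h; exact_mod_cast this
  rw [PySem.List.pyRange_one_cons hl]
  simp only [List.flatMap_cons, pvChunk]
  split_ifs <;> simp

-- run-scan invariant on a sorted suffix s, prev = x below every element of s, run r ≤ best b:
-- the final best dominates every "adjusted multiplicity" and is one of them (or stays b)
theorem count_cons_int (w y : Int) (t : List Int) :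
    (((y :: t).count w : Int)) = (t.count w : Int) + (if w = y then 1 else 0) := by
  by_cases h : w = y
  · subst h; rw [List.count_cons_self, if_pos rfl]; push_cast; ring
  · rw [List.count_cons_of_ne (Ne.symm h), if_neg h]; ring

theorem runInv (s : List Int) (hs : s.Pairwise (· ≤ ·)) :
    ∀ (b r x : Int), r ≤ b → 0 < b → (∀ y ∈ s, x ≤ y) →
      b ≤ (s.foldl pvRunStep (b, r, some x)).1
      ∧ (∀ v ∈ s, (s.count v : Int) + (if v = x then r else 0) ≤ (s.foldl pvRunStep (b, r, some x)).1)
      ∧ ((s.foldl pvRunStep (b, r, some x)).1 = b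
         ∨ ∃ v ∈ s, (s.foldl pvRunStep (b, r, some x)).1 = (s.count v : Int) + (if v = x then r else 0)) := by
  induction s with
  | nil => intro b r x _ _ _; exact ⟨le_refl b, by simp, Or.inl rfl⟩
  | cons v t ih =>
      intro b r x hrb hb hxs
      rw [List.pairwise_cons] at hs
      obtain ⟨hv, ht⟩ := hs
      have hfold : (v :: t).foldl pvRunStep (b, r, some x)
          = t.foldl pvRunStep (pvRunStep (b, r, some x) v) := rfl
      by_cases hxv : x = v
      · -- run extends
        subst hxv
        have hstep : pvRunStep (b, r, some x) x
            = (if r + 1 > b then r + 1 else b, r + 1, some x) := by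
          simp [pvRunStep]
        set b' : Int := if r + 1 > b then r + 1 else b with hb'
        have hrb' : r + 1 ≤ b' := by rw [hb']; split_ifs <;> omega
        have hbb' : b ≤ b' := by rw [hb']; split_ifs <;> omega
        have hb0' : 0 < b' := lt_of_lt_of_le hb hbb'
        obtain ⟨h1, h2, h3⟩ := ih ht b' (r + 1) x hrb' hb0' hv
        rw [hfold, hstep]
        refine ⟨le_trans hbb' h1, ?_, ?_⟩
        · intro w hw
          have hcc := count_cons_int w x t
          by_cases hwx : w = x
          · rw [if_pos hwx] at hcc ⊢
            by_cases hwt : w ∈ t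
            · have h2' := h2 w hwt
              rw [if_pos hwx] at h2'
              omega
            · have hc0 : t.count w = 0 := List.count_eq_zero.2 hwt
              have : r + 1 ≤ (t.foldl pvRunStep (b', r + 1, some x)).1 := le_trans hrb' h1
              omega
          · rw [if_neg hwx] at hcc ⊢
            have hwt : w ∈ t := by
              rcases List.mem_cons.1 hw with h' | h'
              · exact absurd h' hwx
              · exact h'
            have h2' := h2 w hwt
            rw [if_neg hwx] at h2'
            omega
        · rcases h3 with h3 | ⟨w, hwt, h3⟩
          · by_cases hcase : r + 1 > b
            · -- best became r+1: x's multiplicity must be exactly r+1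
              right
              refine ⟨x, List.mem_cons_self, ?_⟩
              have hMval : (t.foldl pvRunStep (b', r + 1, some x)).1 = r + 1 := by
                rw [h3, hb', if_pos hcase]
              have hxt : x ∉ t := by
                intro hxt
                have h2' := h2 x hxt
                rw [if_pos rfl] at h2'
                have hone : (1 : Int) ≤ t.count x := by
                  exact_mod_cast List.one_le_count_iff.2 hxt
                omega
              have hc0 : t.count x = 0 := List.count_eq_zero.2 hxt
              have hcc := count_cons_int x x t
              rw [if_pos rfl] at hcc ⊢
              omega
            · left
              rw [h3, hb', if_neg hcase]
          · right
            have hcc := count_cons_int w x t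
            by_cases hwx : w = x
            · refine ⟨w, by rw [hwx]; exact List.mem_cons_self, ?_⟩
              rw [if_pos hwx] at h3 hcc ⊢
              omega
            · refine ⟨w, List.mem_cons_of_mem _ hwt, ?_⟩
              rw [if_neg hwx] at h3 hcc ⊢
              omega
      · -- new run of length 1; best unchanged since 0 < b
        have hstep : pvRunStep (b, r, some x) v = (b, 1, some v) := by
          simp only [pvRunStep, Option.some.injEq, if_neg hxv]
          have h1b : ¬ ((1 : Int) > b) := by omega
          simp [h1b]
        have hxlt : x < v := lt_of_le_of_ne (hxs v List.mem_cons_self) hxv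
        have hnex : ∀ y ∈ v :: t, ¬ y = x := by
          intro y hy
          rcases List.mem_cons.1 hy with rfl | hyt
          · omega
          · have := hv y hyt; omega
        obtain ⟨h1, h2, h3⟩ := ih ht b 1 v (by omega) hb hv
        rw [hfold, hstep]
        refine ⟨h1, ?_, ?_⟩
        · intro w hw
          rw [if_neg (hnex w hw)]
          have hcc := count_cons_int w v t
          by_cases hwv : w = v
          · rw [if_pos hwv] at hcc
            by_cases hwt : w ∈ t
            · have h2' := h2 w hwt
              rw [if_pos hwv] at h2'
              omega
            · have hc0 : t.count w = 0 := List.count_eq_zero.2 hwt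
              omega
          · rw [if_neg hwv] at hcc
            have hwt : w ∈ t := by
              rcases List.mem_cons.1 hw with h' | h'
              · exact absurd h' hwv
              · exact h'
            have h2' := h2 w hwt
            rw [if_neg hwv] at h2'
            omega
        · rcases h3 with h3 | ⟨w, hwt, h3⟩
          · exact Or.inl h3
          · right
            have hcc := count_cons_int w v t
            by_cases hwv : w = v
            · refine ⟨w, by rw [hwv]; exact List.mem_cons_self, ?_⟩
              rw [if_neg (hnex w (by rw [hwv]; exact List.mem_cons_self))]
              rw [if_pos hwv] at h3 hcc
              omega
            · refine ⟨w, List.mem_cons_of_mem _ hwt, ?_⟩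
              rw [if_neg (hnex w (List.mem_cons_of_mem _ hwt))]
              rw [if_neg hwv] at h3 hcc
              omega

-- B's scan computes the maximal multiplicity of a nonempty list
theorem scan_char (items : List Int) (h : items ≠ []) :
    (∃ v ∈ items, ((PySem.List.sorted items (fun x => x) false).foldl pvRunStep (0, 0, none)).1 = (items.count v : Int))
    ∧ ∀ v ∈ items, (items.count v : Int) ≤ ((PySem.List.sorted items (fun x => x) false).foldl pvRunStep (0, 0, none)).1 := by
  have hperm : (PySem.List.sorted items (fun x => x) false).Perm items :=
    PySem.List.sorted_perm items (fun x => x) false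
  have hcount : ∀ v, (PySem.List.sorted items (fun x => x) false).count v = items.count v :=
    fun v => hperm.count_eq v
  have hmem : ∀ v, v ∈ PySem.List.sorted items (fun x => x) false ↔ v ∈ items :=
    fun v => hperm.mem_iff
  have hpw : (PySem.List.sorted items (fun x => x) false).Pairwise (· ≤ ·) := by
    have := PySem.List.sorted_pairwise items (fun x => x)
    simpa using this
  cases hsrt : PySem.List.sorted items (fun x => x) false with
  | nil => exact absurd ((PySem.List.sorted_eq_nil_iff _ _ _).1 hsrt) h
  | cons v0 t =>
      rw [hsrt] at hpw hcount hmem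
      rw [List.pairwise_cons] at hpw
      obtain ⟨hv0, ht⟩ := hpw
      have hstep0 : pvRunStep (0, 0, none) v0 = (1, 1, some v0) := by
        simp [pvRunStep]
      have hfold : ((v0 :: t).foldl pvRunStep ((0 : Int), (0 : Int), (none : Option Int))).1
          = (t.foldl pvRunStep (1, 1, some v0)).1 := by
        rw [List.foldl_cons, hstep0]
      obtain ⟨h1, h2, h3⟩ := runInv t ht 1 1 v0 le_rfl one_pos hv0
      constructor
      · rcases h3 with h3 | ⟨w, hwt, h3⟩
        · -- best stayed 1: v0's multiplicity is exactly 1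
          refine ⟨v0, (hmem v0).1 List.mem_cons_self, ?_⟩
          have hv0t : v0 ∉ t := by
            intro hmm
            have h2' := h2 v0 hmm
            rw [if_pos rfl] at h2'
            have hone : (1 : Int) ≤ t.count v0 := by
              exact_mod_cast List.one_le_count_iff.2 hmm
            omega
          have hc0 : t.count v0 = 0 := List.count_eq_zero.2 hv0t
          have hcc := count_cons_int v0 v0 t
          rw [if_pos rfl] at hcc
          rw [hfold, ← hcount v0]
          omega
        · have hcc := count_cons_int w v0 t
          by_cases hwv : w = v0
          · refine ⟨w, (hmem w).1 (by rw [hwv]; exact List.mem_cons_self), ?_⟩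
            rw [if_pos hwv] at h3 hcc
            rw [hfold, ← hcount w]
            omega
          · refine ⟨w, (hmem w).1 (List.mem_cons_of_mem _ hwt), ?_⟩
            rw [if_neg hwv] at h3 hcc
            rw [hfold, ← hcount w]
            omega
      · intro w hw
        rw [hfold, ← hcount w]
        have hcc := count_cons_int w v0 t
        by_cases hwv : w = v0
        · rw [if_pos hwv] at hcc
          by_cases hwt : w ∈ t
          · have h2' := h2 w hwt
            rw [if_pos hwv] at h2'
            omega
          · have hc0 : t.count w = 0 := List.count_eq_zero.2 hwt
            omega
        · rw [if_neg hwv] at hcc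
          have hwt : w ∈ t := by
            rcases List.mem_cons.1 ((hmem w).2 hw) with h' | h'
            · exact absurd h' hwv
            · exact h'
          have h2' := h2 w hwt
          rw [if_neg hwv] at h2'
          omega

-- ===== VERDICT (by name: the statement is the Claim_ definition above) =====
theorem rectangleStrip_spec : Claim_equal_rectangleStrip := by
  intro arr1 arr2 _ hpre
  unfold Spec_rectangleStrip rectangleStrip rectangleStrip_alt
  simp only [valueMapA_eq]
  set items := (PySem.List.pyRange 0 arr1.length 1).flatMap (pvChunk arr1 arr2) with hitems
  have hne : items ≠ [] := items_ne arr1 arr2 hpre.1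
  obtain ⟨⟨vB, hvB, hB⟩, hBmax⟩ := scan_char items hne
  -- the A side: max? of the counter's values is some m
  have hvne : (PySem.Dict.counter items).values ≠ [] := by
    intro hnil
    obtain ⟨v0, hv0⟩ := List.exists_mem_of_ne_nil items hne
    have : (items.count v0 : Int) ∈ (PySem.Dict.counter items).values :=
      (values_counter_setEq items _).2 ⟨v0, hv0, rfl⟩
    simp [hnil] at this
  cases hm : PySem.List.max? (PySem.Dict.counter items).values (fun y => y) with
  | none => exact absurd ((PySem.List.max?_eq_none_iff _ _).1 hm) hvne
  | some m =>
      simp only [Option.getD_some]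
      obtain ⟨vA, hvA, hA⟩ := (values_counter_setEq items m).1 (PySem.List.max?_mem hm)
      -- m ≤ B's result, and B's result ≤ m
      have hmB : m ≤ ((PySem.List.sorted items (fun x => x) false).foldl pvRunStep (0, 0, none)).1 := by
        rw [hA]; exact hBmax vA hvA
      have hBm : ((PySem.List.sorted items (fun x => x) false).foldl pvRunStep (0, 0, none)).1 ≤ m := by
        rw [hB]
        exact PySem.List.max?_isMax hm _ ((values_counter_setEq items _).2 ⟨vB, hvB, rfl⟩)
      exact le_antisymm hmB hBm
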